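-- pv_equiv track=rewrite | github.com/miklevin/pipulate | apps/050_documentation.py | parse_paginated_document
-- ===== SOURCE A (Python) =====
-- def parse_paginated_document(content, separator='-' * 80):
--     """Generic method to parse any paginated document"""
--     pages = []
--     current_page = []
--     lines = content.split('\n')
--
--     for line in lines:
--         if line.strip() == separator:
--             # Found a page separator
--             if current_page:
--                 pages.append('\n'.join(current_page))
--                 current_page = []
--         else:
--             current_page.append(line)
--
--     # Add the last page if there's content
--     if current_page:
--         pages.append('\n'.join(current_page))
--
--     return pages
-- ===== SOURCE B (Python) =====
-- def parse_paginated_document(content, separator='-' * 80):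
--     """Generic method to parse any paginated document"""
--     lines = content.split('\n')
--     n = len(lines)
--     pages = []
--     i = 0
--     while i < n:
--         if lines[i].strip() == separator:
--             i += 1
--         else:
--             j = i + 1
--             while j < n and lines[j].strip() != separator:
--                 j += 1
--             pages.append('\n'.join(lines[i:j]))
--             i = j
--     return pages
-- ===== Notes on version B (the rewrite author's own statement) =====
-- stated objective: alternative
-- what changed: Replaces A's current_page accumulator with double flush logic by a two-pointer run scan: each page is extracted in one inner scan to the next separator line and joined directly, with no accumulator list or duplicated flush.
import Mathlib
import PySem

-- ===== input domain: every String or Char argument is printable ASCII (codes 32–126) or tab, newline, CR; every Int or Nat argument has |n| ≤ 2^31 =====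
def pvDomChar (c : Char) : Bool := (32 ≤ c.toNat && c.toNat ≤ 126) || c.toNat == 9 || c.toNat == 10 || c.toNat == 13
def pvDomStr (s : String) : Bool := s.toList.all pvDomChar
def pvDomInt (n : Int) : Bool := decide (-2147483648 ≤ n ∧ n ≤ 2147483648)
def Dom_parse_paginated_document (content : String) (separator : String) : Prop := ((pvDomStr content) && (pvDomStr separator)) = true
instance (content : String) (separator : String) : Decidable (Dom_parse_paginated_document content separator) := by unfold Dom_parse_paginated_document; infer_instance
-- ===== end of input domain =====

-- B replaces A's current_page accumulator (with its duplicated flush logic) by a two-pointer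
-- run scan that extracts and joins each page in one inner scan; alternative decomposition, same cost.


-- ===== PORT A =====
-- the loop body: on a separator line flush current_page (if non-empty), else append the line
def pvStepA (separator : String) (s : List String × List String) (line : String) :
    List String × List String :=
  if PySem.Str.strip line == separator then
    if !s.2.isEmpty then (s.1 ++ [PySem.Str.join "\n" s.2], []) else s
  else (s.1, s.2 ++ [line])

-- the code after the loop: add the last page if there's content
def pvFinishA (st : List String × List String) : List String :=
  if !st.2.isEmpty then st.1 ++ [PySem.Str.join "\n" st.2] else st.1

-- content.split('\n') — '\n' ≠ "", so split? is always some; getD only discharges the Option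
def parse_paginated_document (content : String) (separator : String) : List String :=
  let lines : List String := (PySem.Str.split? content "\n").getD []
  pvFinishA (lines.foldl (pvStepA separator) ([], []))

-- ===== PORT B =====
-- two-pointer run scan: skip a separator line, else take the run up to the next separator
-- (B's inner 'while j < n and …' scan is the takeWhile/dropWhile split; lines[i:j] is the run)
def pvRun (separator : String) : List String → List String
  | [] => []
  | l :: ls =>
    if PySem.Str.strip l == separator then pvRun separator ls
    else
      PySem.Str.join "\n" (l :: ls.takeWhile (fun x => !(PySem.Str.strip x == separator)))
        :: pvRun separator (ls.dropWhile (fun x => !(PySem.Str.strip x == separator)))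
termination_by ls => ls.length
decreasing_by
  all_goals
    have := List.length_dropWhile_le (fun x => !(PySem.Str.strip x == separator)) ls
    first
      | (simp; omega)
      | simp

def parse_paginated_document_alt (content : String) (separator : String) : List String :=
  pvRun separator ((PySem.Str.split? content "\n").getD [])

-- ===== PRECONDITION & SPEC =====
def Spec_parse_paginated_document (content : String) (separator : String) (out : List String) : Prop := out = parse_paginated_document_alt content separator
instance (content : String) (separator : String) (out : List String) : Decidable (Spec_parse_paginated_document content separator out) := by unfold Spec_parse_paginated_document; infer_instance

-- ===== CLAIM (what is proved, stated in full; the proofs are below) =====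
def Claim_equal_parse_paginated_document : Prop := ∀ (content : String) (separator : String), Dom_parse_paginated_document content separator → Spec_parse_paginated_document content separator (parse_paginated_document content separator)

-- ===== LEMMAS AND PROOFS =====

-- proof-only bridge: A's loop with pending page `cur`, written as structural recursion
def pvEmit (cur : List String) : List String :=
  if cur.isEmpty then [] else [PySem.Str.join "\n" cur]

def pvGoC (separator : String) (cur : List String) : List String → List String
  | [] => pvEmit cur
  | l :: ls =>
    if PySem.Str.strip l == separator then pvEmit cur ++ pvGoC separator [] ls
    else pvGoC separator (cur ++ [l]) ls

theorem pvFold_eq_goC (separator : String) (ls : List String) :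
    ∀ (pages cur : List String),
      pvFinishA (ls.foldl (pvStepA separator) (pages, cur)) = pages ++ pvGoC separator cur ls := by
  induction ls with
  | nil =>
    intro pages cur
    by_cases h : cur.isEmpty <;> simp_all [pvGoC, pvEmit, pvFinishA]
  | cons l ls ih =>
    intro pages cur
    simp only [List.foldl_cons, pvStepA, pvGoC]
    by_cases hq : (PySem.Str.strip l == separator) = true
    · by_cases hc : cur.isEmpty
      · have : cur = [] := by simpa using hc
        simp [hq, ih, pvEmit, this]
      · simp [hq, hc, ih, pvEmit]
    · simp [hq, ih]

theorem pvGoC_run (separator : String) (ls : List String) :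
    ∀ (cur : List String),
      pvGoC separator cur ls
      = pvEmit (cur ++ ls.takeWhile (fun x => !(PySem.Str.strip x == separator)))
        ++ pvGoC separator [] ((ls.dropWhile (fun x => !(PySem.Str.strip x == separator))).drop 1) := by
  induction ls with
  | nil => intro cur; simp [pvGoC, pvEmit]
  | cons l ls ih =>
    intro cur
    by_cases hq : (PySem.Str.strip l == separator) = true
    · simp [pvGoC, hq]
    · simp only [pvGoC, hq, List.takeWhile_cons, List.dropWhile_cons,
        Bool.not_eq_true', ih]
      simp

theorem pvRun_eq_goC (separator : String) (ls : List String) :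
    pvRun separator ls = pvGoC separator [] ls := by
  induction hn : ls.length using Nat.strong_induction_on generalizing ls with
  | _ n ih =>
    cases ls with
    | nil => simp [pvRun, pvGoC, pvEmit]
    | cons l ls =>
      by_cases hq : (PySem.Str.strip l == separator) = true
      · rw [pvRun, if_pos hq, pvGoC, if_pos hq]
        simp only [pvEmit, List.isEmpty_nil, if_true, List.nil_append]
        exact ih ls.length (by simp [← hn]) ls rfl
      · rw [pvRun, if_neg hq, pvGoC, if_neg hq, List.nil_append,
          pvGoC_run separator ls ([l])]
        have hrest : pvRun separator (ls.dropWhile (fun x => !(PySem.Str.strip x == separator)))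
            = pvGoC separator [] ((ls.dropWhile (fun x => !(PySem.Str.strip x == separator))).drop 1) := by
          cases hd : ls.dropWhile (fun x => !(PySem.Str.strip x == separator)) with
          | nil => simp [pvRun, pvGoC, pvEmit]
          | cons s rest =>
            have hs : (fun x => !(PySem.Str.strip x == separator)) s = false := by
              have := List.head_dropWhile_not (p := (fun x => !(PySem.Str.strip x == separator)))
                (l := ls) (by simp [hd])
              simpa [hd] using this
            have hs' : (PySem.Str.strip s == separator) = true := by simpa using hs
            have hlen : rest.length < n := by
              have h1 := List.length_dropWhile_le (fun x => !(PySem.Str.strip x == separator)) ls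
              rw [hd] at h1
              simp at h1 hn
              omega
            rw [pvRun, if_pos hs']
            simp only [List.drop_one, List.tail_cons]
            exact ih rest.length hlen rest rfl
        rw [hrest]
        simp [pvEmit]

-- ===== VERDICT (by name: the statement is the Claim_ definition above) =====
theorem parse_paginated_document_spec : Claim_equal_parse_paginated_document := by
  intro content separator _
  unfold Spec_parse_paginated_document parse_paginated_document parse_paginated_document_alt
  rw [pvRun_eq_goC]
  simpa using pvFold_eq_goC separator ((PySem.Str.split? content "\n").getD []) [] []
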